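-- pv_equiv track=rewrite | github.com/CaHudson94/code-katas | katas/string-pyramid/src/string_pyramid.py | watch_pyramid_from_the_side
-- ===== SOURCE A (Python) =====
-- def watch_pyramid_from_the_side(characters):
--     """Visual of the pyramid from the side."""
--     if not characters:
--         return characters
--     count = 1
--     char_list = []
--     space_count = len(characters) - 1
--     spaces = ' ' * space_count
--     pyramid = ''
--     for character in characters:
--         char_list.append(character)
--     for character in char_list[::-1]:
--         pyramid += (spaces + (character * count) + spaces)
--         pyramid += '\n'
--         space_count -= 1
--         count += 2
--         spaces = ' ' * space_count
--     return pyramid[:-1]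
-- ===== SOURCE B (Python) =====
-- def watch_pyramid_from_the_side(characters):
--     """Visual of the pyramid from the side."""
--     if not characters:
--         return characters
--     n = len(characters)
--     lines = []
--     for i, ch in enumerate(characters):
--         row = [' '] * (2 * n - 1)
--         for col in range(i, 2 * n - 1 - i):
--             row[col] = ch
--         lines.append(''.join(row))
--     return '\n'.join(reversed(lines))
-- ===== Notes on version B (the rewrite author's own statement) =====
-- stated objective: alternative
-- what changed: Replaces A's single loop over the reversed string with four mutated running variables (count, space_count, spaces, a growing pyramid string sliced at the end) by a canvas-painting approach: for each character in forward order, paint its span into a fresh row of 2n-1 spaces via index assignment, collect the rows, and join them reversed.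
import Mathlib
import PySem

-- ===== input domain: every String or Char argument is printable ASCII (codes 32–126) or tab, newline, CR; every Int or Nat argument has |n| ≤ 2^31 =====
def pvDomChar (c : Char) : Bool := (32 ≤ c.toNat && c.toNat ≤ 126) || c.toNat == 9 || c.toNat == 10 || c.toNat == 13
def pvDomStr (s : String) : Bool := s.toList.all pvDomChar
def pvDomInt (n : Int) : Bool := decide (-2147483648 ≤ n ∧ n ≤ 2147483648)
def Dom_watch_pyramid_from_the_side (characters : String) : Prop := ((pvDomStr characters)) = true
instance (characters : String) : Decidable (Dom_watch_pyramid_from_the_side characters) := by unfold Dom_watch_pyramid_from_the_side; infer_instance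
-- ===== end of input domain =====

-- B replaces A's reversed-string loop with mutated counters (count/space_count/spaces/pyramid)
-- by painting each character's span into a mutable row of spaces, collecting rows bottom-up and
-- reversing the list of lines — objective: alternative.


-- ===== PORT A =====
def watch_pyramid_from_the_side (characters : String) : String :=
  -- if not characters: return characters
  if PySem.Str.len characters = 0 then characters
  else
    let count : Int := 1
    -- for character in characters: char_list.append(character)
    let char_list : List Char := characters.toList.foldl (fun acc c => acc ++ [c]) []
    let space_count : Int := PySem.Str.len characters - 1
    let spaces : List Char := List.replicate space_count.toNat ' '  -- ' ' * space_count
    -- for character in char_list[::-1]: … (state = pyramid, count, space_count, spaces)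
    let st := ((PySem.List.slice? char_list none none (-1)).getD []).foldl
      (fun (st : List Char × Int × Int × List Char) c =>
        let pyramid := st.1 ++ st.2.2.2 ++ List.replicate st.2.1.toNat c ++ st.2.2.2
        let pyramid := pyramid ++ ['\n']
        let space_count := st.2.2.1 - 1
        let count := st.2.1 + 2
        let spaces := List.replicate space_count.toNat ' '
        (pyramid, count, space_count, spaces))
      (([] : List Char), count, space_count, spaces)
    String.ofList (PySem.List.slice st.1 none (some (-1)))  -- pyramid[:-1]

-- ===== PORT B =====
def watch_pyramid_from_the_side_alt (characters : String) : String :=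
  if PySem.Str.len characters = 0 then characters
  else
    let n : Int := PySem.Str.len characters
    -- for i, ch in enumerate(characters): paint row[col] = ch for col in range(i, 2n-1-i); append line
    let lines : List (List Char) := (PySem.List.enumerate characters.toList).foldl
      (fun (lines : List (List Char)) (p : Int × Char) =>
        let row : List Char := List.replicate (2 * n - 1).toNat ' '  -- [' '] * (2n-1)
        let row := (PySem.List.pyRange p.1 (2 * n - 1 - p.1)).foldl
          (fun r col => PySem.List.pySetD r col p.2) row
        lines ++ [row])
      []
    String.ofList (PySem.Chars.join ['\n'] lines.reverse)  -- '\n'.join(reversed(lines))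

-- ===== PRECONDITION & SPEC =====
def Spec_watch_pyramid_from_the_side (characters : String) (out : String) : Prop := out = watch_pyramid_from_the_side_alt characters
instance (characters : String) (out : String) : Decidable (Spec_watch_pyramid_from_the_side characters out) := by unfold Spec_watch_pyramid_from_the_side; infer_instance

-- ===== CLAIM (what is proved, stated in full; the proofs are below) =====
def Claim_equal_watch_pyramid_from_the_side : Prop := ∀ (characters : String), Dom_watch_pyramid_from_the_side characters → Spec_watch_pyramid_from_the_side characters (watch_pyramid_from_the_side characters)

-- ===== LEMMAS AND PROOFS =====

/-- The body of A's loop, as a recursion: one line (flanked by `sc` spaces,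
`cnt` copies of the character) plus a newline per remaining character. -/
def pvAux (r : List Char) (cnt sc : Int) : List Char :=
  match r with
  | [] => []
  | c :: r' =>
      List.replicate sc.toNat ' ' ++ List.replicate cnt.toNat c
        ++ List.replicate sc.toNat ' ' ++ ['\n'] ++ pvAux r' (cnt + 2) (sc - 1)

lemma pvFoldA (r : List Char) : ∀ (p : List Char) (cnt sc : Int),
    (r.foldl
      (fun (st : List Char × Int × Int × List Char) c =>
        let pyramid := st.1 ++ st.2.2.2 ++ List.replicate st.2.1.toNat c ++ st.2.2.2
        let pyramid := pyramid ++ ['\n']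
        let space_count := st.2.2.1 - 1
        let count := st.2.1 + 2
        let spaces := List.replicate space_count.toNat ' '
        (pyramid, count, space_count, spaces))
      (p, cnt, sc, List.replicate sc.toNat ' ')).1 = p ++ pvAux r cnt sc := by
  induction r with
  | nil => intro p cnt sc; simp [pvAux]
  | cons c r ih =>
      intro p cnt sc
      simp only [List.foldl_cons]
      rw [ih]
      simp [pvAux]

lemma pvAux_eq (r : List Char) : ∀ (cnt sc : Int),
    pvAux r cnt sc =
      ((List.range r.length).map (fun (i : Nat) =>
        (List.replicate (sc - (i : Int)).toNat ' '
          ++ List.replicate (cnt + 2 * (i : Int)).toNat (r.getD i ' ')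
          ++ List.replicate (sc - (i : Int)).toNat ' ') ++ ['\n'])).flatten := by
  induction r with
  | nil => intro cnt sc; simp [pvAux]
  | cons c r ih =>
      intro cnt sc
      rw [List.length_cons, List.range_succ_eq_map, pvAux, ih (cnt + 2) (sc - 1)]
      simp only [List.map_cons, List.map_map, List.flatten_cons, Function.comp_def,
        List.getD_cons_zero, List.getD_cons_succ, Nat.cast_zero, mul_zero, add_zero, sub_zero,
        List.append_assoc]
      congr 4
      congr 1
      apply List.map_congr_left
      intro i _
      have h1 : (sc - 1 - (i : Int)).toNat = (sc - (i.succ : Int)).toNat := by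
        simp only [Nat.cast_succ]; omega
      have h2 : (cnt + 2 + 2 * (i : Int)).toNat = (cnt + 2 * (i.succ : Int)).toNat := by
        simp only [Nat.cast_succ]; omega
      rw [h1, h2]

lemma pvJoin_of_flatten {α : Type} (g : α → List Char) (l : List α) (h : l ≠ []) :
    (l.map (fun i => g i ++ ['\n'])).flatten.dropLast = PySem.Chars.join ['\n'] (l.map g) := by
  induction l with
  | nil => simp at h
  | cons a t ih =>
      cases t with
      | nil => simp [PySem.Chars.join, List.intercalate]
      | cons b t' =>
          rw [List.map_cons, List.flatten_cons]
          rw [List.dropLast_append_of_ne_nil (by simp)]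
          rw [ih (by simp)]
          simp only [List.map_cons, PySem.Chars.join_cons_cons, List.append_assoc]

/-- Painting `mid.length` consecutive cells starting right after `pre` overwrites exactly `mid`. -/
lemma pvPaintNat (ch : Char) : ∀ (mid pre suf : List Char),
    (List.range mid.length).foldl (fun r j => r.set (pre.length + j) ch) (pre ++ mid ++ suf)
      = pre ++ List.replicate mid.length ch ++ suf := by
  intro mid
  induction mid with
  | nil => intro pre suf; simp
  | cons m mid ih =>
      intro pre suf
      rw [List.length_cons, List.range_succ_eq_map, List.foldl_cons, List.foldl_map]
      have hset : (pre ++ (m :: mid) ++ suf).set (pre.length + 0) ch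
          = (pre ++ [ch]) ++ (mid ++ suf) := by
        rw [Nat.add_zero, List.append_assoc, List.set_append]
        simp
      rw [hset]
      have harg : ∀ (j : Nat), pre.length + j.succ = (pre ++ [ch]).length + j := by
        intro j; simp; omega
      simp only [harg]
      have := ih (pre ++ [ch]) suf
      rw [show (pre ++ [ch]) ++ (mid ++ suf) = (pre ++ [ch]) ++ mid ++ suf by simp] at *
      rw [this, List.replicate_succ]
      simp
/-- One painted row: spans of blanks around `2*(L-1-k)+1` copies of the character. -/
lemma pvPaintRow (L k : Nat) (hk : k < L) (ch : Char) :
    (PySem.List.pyRange (k : Int) (2 * (L : Int) - 1 - (k : Int))).foldl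
      (fun r col => PySem.List.pySetD r col ch) (List.replicate (2 * (L : Int) - 1).toNat ' ')
    = List.replicate k ' ' ++ List.replicate (2 * (L - 1 - k) + 1) ch ++ List.replicate k ' ' := by
  rw [PySem.List.pyRange_one, List.foldl_map]
  have hK : ((2 * (L : Int) - 1 - (k : Int)) - (k : Int)).toNat = 2 * (L - 1 - k) + 1 := by omega
  have hL : (2 * (L : Int) - 1).toNat = k + (2 * (L - 1 - k) + 1) + k := by omega
  rw [hK, hL]
  rw [PySem.List.foldl_congr_mem _ _ (fun r j => r.set (k + j) ch) _ (by
    intro r j hj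
    rw [PySem.List.pySetD_of_nonneg _ _ (by positivity)]
    congr 1)]
  have hrep : List.replicate (k + (2 * (L - 1 - k) + 1) + k) (' ' : Char)
      = List.replicate k ' ' ++ List.replicate (2 * (L - 1 - k) + 1) ' ' ++ List.replicate k ' ' := by
    rw [← List.replicate_add, ← List.replicate_add]
  rw [hrep]
  have := pvPaintNat ch (List.replicate (2 * (L - 1 - k) + 1) ' ')
    (List.replicate k ' ') (List.replicate k ' ')
  simp only [List.length_replicate] at this
  exact this

/-- Reversing a map over `range`. -/
lemma pvReverse_map_range {α : Type} (g : Nat → α) (N : Nat) :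
    (List.map g (List.range N)).reverse = (List.range N).map (fun r => g (N - 1 - r)) := by
  apply List.ext_getElem (by simp)
  intro r h1 h2
  simp only [List.getElem_reverse, List.getElem_map, List.getElem_range, List.length_map,
    List.length_range]

-- ===== VERDICT (by name: the statement is the Claim_ definition above) =====
theorem watch_pyramid_from_the_side_spec : Claim_equal_watch_pyramid_from_the_side := by
  intro s _
  unfold Spec_watch_pyramid_from_the_side
  by_cases h : PySem.Str.len s = 0
  · have h0 : s = "" := by
      rw [PySem.Str.len_eq] at h
      exact String.toList_eq_nil_iff.mp (by exact_mod_cast List.length_eq_zero_iff.mp (by exact_mod_cast h))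
    simp [watch_pyramid_from_the_side, watch_pyramid_from_the_side_alt, h0]
  · have hn : s.toList.length ≠ 0 := by
      intro h0
      apply h
      simp [PySem.Str.len_eq, h0]
    simp only [watch_pyramid_from_the_side, watch_pyramid_from_the_side_alt, if_neg h,
      PySem.List.foldl_append_singleton, List.nil_append,
      PySem.List.slice?_none_none_neg_one, Option.getD_some]
    rw [pvFoldA, PySem.List.slice_to_neg_one, List.nil_append, pvAux_eq]
    rw [pvJoin_of_flatten _ _ (by simp [List.range_eq_nil]; intro hs; exact hn (by simp [hs]))]
    -- evaluate B's side: lines = one painted row per (index, character)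
    rw [PySem.List.enumerate_eq_map_pyRange s.toList ' ', List.foldl_map,
      PySem.List.foldl_append_singleton_eq_map, List.nil_append,
      PySem.List.pyRange_one, List.map_map]
    simp only [Function.comp_def, zero_add, sub_zero, PySem.List.len, Int.toNat_natCast,
      PySem.List.pyGetD_natCast]
    rw [pvReverse_map_range]
    congr 1
    simp only [List.length_reverse]
    congr 1
    apply List.map_congr_left
    intro r hr
    rw [List.mem_range] at hr
    set L := s.toList.length with hL
    have hkL : L - 1 - r < L := by omega
    rw [show (PySem.Str.len s : Int) = (L : Int) by rw [PySem.Str.len_eq]]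
    rw [pvPaintRow L (L - 1 - r) hkL]
    have e1 : ((L : Int) - 1 - (r : Int)).toNat = L - 1 - r := by omega
    have e2 : ((1 : Int) + 2 * (r : Int)).toNat = 2 * r + 1 := by omega
    have e3 : 2 * (L - 1 - (L - 1 - r)) + 1 = 2 * r + 1 := by omega
    have e4 : s.toList.reverse.getD r ' ' = s.toList.getD (L - 1 - r) ' ' := by
      simp only [List.getD_eq_getElem?_getD]
      rw [List.getElem?_reverse (by omega)]
    rw [e1, e2, e3, e4]
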